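-- pv_equiv track=rewrite | github.com/cocoinit23/atcoder | abc/abc186/C - Unlucky 7.py | check8
-- ===== SOURCE A (Python) =====
-- def check8(x: int):
--     base8 = ''
--     while x > 0:
--         base8 = str(x % 8) + base8
--         x //= 8
--
--     for s in base8:
--         if s == '7':
--             return False
--     return True
-- ===== SOURCE B (Python) =====
-- def check8(x: int):
--     # One pass over the octal digits, no intermediate string.
--     while x > 0:
--         if x % 8 == 7:
--             return False
--         x //= 8
--     return True
-- ===== Notes on version B (the rewrite author's own statement) =====
-- stated objective: simpler
-- what changed: Replaces A's two passes (build the octal string digit by digit, then scan it for '7') with a single while loop that tests x % 8 == 7 directly and returns early, with no string at all.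
import Mathlib
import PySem

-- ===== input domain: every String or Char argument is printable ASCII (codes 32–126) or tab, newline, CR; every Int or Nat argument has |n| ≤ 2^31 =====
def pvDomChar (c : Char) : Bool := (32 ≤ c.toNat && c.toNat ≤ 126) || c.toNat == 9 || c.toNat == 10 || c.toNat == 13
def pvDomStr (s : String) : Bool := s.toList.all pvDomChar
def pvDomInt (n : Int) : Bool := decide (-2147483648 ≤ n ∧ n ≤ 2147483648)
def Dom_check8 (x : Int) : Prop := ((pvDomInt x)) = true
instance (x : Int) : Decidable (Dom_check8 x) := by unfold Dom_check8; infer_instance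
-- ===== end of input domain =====

-- B fuses A's two passes (build octal string, then scan for '7') into one digit-extraction loop with no string.


-- ===== PORT A =====
-- while x > 0: base8 = str(x % 8) + base8; x //= 8
def check8Build (x : Int) (base8 : List Char) : List Char :=
  if x > 0 then
    check8Build (PySem.Int.floordiv x 8) (PySem.Int.toChars (PySem.Int.mod x 8) ++ base8)
  else base8
termination_by x.toNat
decreasing_by
  rename_i h
  have h1 : PySem.Int.floordiv x 8 < x := by
    rw [PySem.Int.floordiv_lt_iff_lt_mul (by omega)]; omega
  have h2 : 0 ≤ PySem.Int.floordiv x 8 := by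
    rw [PySem.Int.le_floordiv_iff_mul_le (by omega)]; omega
  omega

-- for s in base8: if s == '7': return False; return True
def check8Scan : List Char → Bool
  | [] => true
  | c :: cs => if c == '7' then false else check8Scan cs

def check8 (x : Int) : Bool := check8Scan (check8Build x [])

-- ===== PORT B =====
def check8_alt (x : Int) : Bool :=
  if x > 0 then
    if PySem.Int.mod x 8 == 7 then false else check8_alt (PySem.Int.floordiv x 8)
  else true
termination_by x.toNat
decreasing_by
  rename_i h _
  have h1 : PySem.Int.floordiv x 8 < x := by
    rw [PySem.Int.floordiv_lt_iff_lt_mul (by omega)]; omega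
  have h2 : 0 ≤ PySem.Int.floordiv x 8 := by
    rw [PySem.Int.le_floordiv_iff_mul_le (by omega)]; omega
  omega

-- ===== PRECONDITION & SPEC =====
def Spec_check8 (x : Int) (out : Bool) : Prop := out = check8_alt x
instance (x : Int) (out : Bool) : Decidable (Spec_check8 x out) := by unfold Spec_check8; infer_instance

-- ===== CLAIM (what is proved, stated in full; the proofs are below) =====
def Claim_equal_check8 : Prop := ∀ (x : Int), Dom_check8 x → Spec_check8 x (check8 x)

-- ===== LEMMAS AND PROOFS =====
theorem check8Scan_append (a b : List Char) :
    check8Scan (a ++ b) = (check8Scan a && check8Scan b) := by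
  induction a with
  | nil => simp [check8Scan]
  | cons c cs ih =>
    simp only [List.cons_append, check8Scan]
    split_ifs <;> simp [ih]

theorem check8Scan_digit (x : Int) (hx : 0 < x) :
    check8Scan (PySem.Int.toChars (PySem.Int.mod x 8)) = !(PySem.Int.mod x 8 == 7) := by
  have h0 : 0 ≤ PySem.Int.mod x 8 := PySem.Int.mod_nonneg (a := x) (b := 8) (by omega)
  have h1 : PySem.Int.mod x 8 < 8 := PySem.Int.mod_lt (a := x) (b := 8) (by omega)
  set m := PySem.Int.mod x 8 with hm
  interval_cases m <;> decide

theorem check8_main (n : Nat) : ∀ (x : Int), x.toNat = n → ∀ acc,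
    check8Scan (check8Build x acc) = (check8_alt x && check8Scan acc) := by
  induction n using Nat.strong_induction_on with
  | _ n ih =>
    intro x hxn acc
    by_cases hx : x > 0
    · have h1 : PySem.Int.floordiv x 8 < x := by
        rw [PySem.Int.floordiv_lt_iff_lt_mul (by omega)]; omega
      have h2 : 0 ≤ PySem.Int.floordiv x 8 := by
        rw [PySem.Int.le_floordiv_iff_mul_le (by omega)]; omega
      rw [check8Build, if_pos hx, check8_alt, if_pos hx,
        ih (PySem.Int.floordiv x 8).toNat (by omega) _ rfl,
        check8Scan_append, check8Scan_digit x hx]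
      cases h7 : (PySem.Int.mod x 8 == 7) <;> simp
    · rw [check8Build, if_neg hx, check8_alt, if_neg hx]; simp

-- ===== VERDICT (by name: the statement is the Claim_ definition above) =====
theorem check8_spec : Claim_equal_check8 := by
  intro x _
  unfold Spec_check8 check8
  rw [check8_main x.toNat x rfl []]
  simp [check8Scan]
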